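-- pv_equiv track=rewrite | github.com/tejaskannan/smart-tv-keyboard-leakage | smarttvleakage/audio/utils.py | get_num_scrolls
-- ===== SOURCE A (Python) =====
-- from typing import List, Tuple, Set, Union
--
-- def get_num_scrolls(move_times: List[int], cutoff_size: int) -> int:
--     num_scrolls = 0
--     cluster_size = 0
--
--     for idx in range(len(move_times) - 1):
--         curr_time, next_time = move_times[idx], move_times[idx + 1]
--
--         if (next_time == curr_time):
--             cluster_size += 1
--         else:
--             num_scrolls += int(cluster_size >= cutoff_size)
--             cluster_size = 0
--
--     return num_scrolls
-- ===== SOURCE B (Python) =====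
-- def get_num_scrolls(move_times, cutoff_size):
--     # build maximal runs of equal consecutive values, then count
--     # every run except the last whose length exceeds cutoff_size
--     runs = []
--     for t in move_times:
--         if runs and runs[-1][0] == t:
--             runs[-1] = (t, runs[-1][1] + 1)
--         else:
--             runs.append((t, 1))
--     return sum(1 for _, n in runs[:-1] if n > cutoff_size)
-- ===== Notes on version B (the rewrite author's own statement) =====
-- stated objective: alternative
-- what changed: B first compresses the list into maximal runs of equal consecutive values and then counts the non-final runs whose length exceeds cutoff_size, replacing A's adjacent-pair scan with an inline cluster counter.
import Mathlib
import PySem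

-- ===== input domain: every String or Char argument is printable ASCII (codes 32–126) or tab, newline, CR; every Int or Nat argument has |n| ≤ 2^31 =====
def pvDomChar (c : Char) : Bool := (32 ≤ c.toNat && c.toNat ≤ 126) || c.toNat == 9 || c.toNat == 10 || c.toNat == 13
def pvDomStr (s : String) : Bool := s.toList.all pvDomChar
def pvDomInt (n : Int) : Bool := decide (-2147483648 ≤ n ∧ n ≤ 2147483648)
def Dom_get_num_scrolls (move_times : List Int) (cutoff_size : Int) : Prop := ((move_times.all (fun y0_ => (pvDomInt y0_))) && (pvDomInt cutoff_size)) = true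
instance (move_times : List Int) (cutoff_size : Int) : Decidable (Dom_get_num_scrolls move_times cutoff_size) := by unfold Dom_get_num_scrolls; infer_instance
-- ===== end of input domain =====

-- B compresses the list into maximal runs of equal consecutive values, then counts
-- the non-final runs whose length exceeds cutoff_size (alternative decomposition, same cost).

-- ===== PORT A =====
-- A's loop over idx in range(len-1) reading move_times[idx], move_times[idx+1]
-- is ported as a fold over the list of adjacent pairs (always-in-range indexing),
-- with the same (num_scrolls, cluster_size) state and the same branch order.
def get_num_scrolls (move_times : List Int) (cutoff_size : Int) : Int :=
  let st := (move_times.zip move_times.tail).foldl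
    (fun (s : Int × Int) (p : Int × Int) =>
      if p.2 = p.1 then (s.1, s.2 + 1)
      else (s.1 + (if s.2 ≥ cutoff_size then 1 else 0), 0))
    (0, 0)
  st.1

-- ===== PORT B =====
-- one step of Source B's run-building loop: extend the last run or append a new one
def runsStep (runs : List (Int × Int)) (t : Int) : List (Int × Int) :=
  match runs.getLast? with
  | some (v, n) => if v = t then runs.dropLast ++ [(t, n + 1)] else runs ++ [(t, 1)]
  | none => [(t, 1)]

def get_num_scrolls_alt (move_times : List Int) (cutoff_size : Int) : Int :=
  let runs := move_times.foldl runsStep []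
  ((runs.dropLast.filter (fun p => p.2 > cutoff_size)).length : Int)

-- ===== PRECONDITION & SPEC =====
def Spec_get_num_scrolls (move_times : List Int) (cutoff_size : Int) (out : Int) : Prop := out = get_num_scrolls_alt move_times cutoff_size
instance (move_times : List Int) (cutoff_size : Int) (out : Int) : Decidable (Spec_get_num_scrolls move_times cutoff_size out) := by unfold Spec_get_num_scrolls; infer_instance

-- ===== CLAIM (what is proved, stated in full; the proofs are below) =====
def Claim_equal_get_num_scrolls : Prop := ∀ (move_times : List Int) (cutoff_size : Int), Dom_get_num_scrolls move_times cutoff_size → Spec_get_num_scrolls move_times cutoff_size (get_num_scrolls move_times cutoff_size)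

-- ===== LEMMAS AND PROOFS =====

-- A's fold, written as structural recursion carrying the previous element
def afold (c ns cs prev : Int) : List Int → Int
  | [] => ns
  | t :: r =>
    if t = prev then afold c ns (cs + 1) t r
    else afold c (ns + (if cs ≥ c then 1 else 0)) 0 t r

-- B's run builder, written as structural recursion on the rest of the list
def bfold (rs : List (Int × Int)) (v k : Int) : List Int → List (Int × Int)
  | [] => rs ++ [(v, k)]
  | t :: r => if v = t then bfold rs v (k + 1) r else bfold (rs ++ [(v, k)]) t 1 r

theorem afold_eq (c : Int) (r : List Int) : ∀ (prev ns cs : Int),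
    ((((prev :: r).zip r).foldl
      (fun (s : Int × Int) (p : Int × Int) =>
        if p.2 = p.1 then (s.1, s.2 + 1)
        else (s.1 + (if s.2 ≥ c then 1 else 0), 0)) (ns, cs)).1) = afold c ns cs prev r := by
  induction r with
  | nil => intro prev ns cs; simp [afold]
  | cons t r ih =>
    intro prev ns cs
    simp only [List.zip_cons_cons, List.foldl_cons, afold]
    by_cases h : t = prev
    · simp [h, ih]
    · simp [h, ih]

theorem bfold_eq (r : List Int) : ∀ (rs : List (Int × Int)) (v k : Int),
    r.foldl runsStep (rs ++ [(v, k)]) = bfold rs v k r := by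
  induction r with
  | nil => intro rs v k; simp [bfold]
  | cons t r ih =>
    intro rs v k
    simp only [List.foldl_cons, bfold, runsStep]
    rw [List.getLast?_concat]
    by_cases h : v = t
    · simp [h, ih]
    · simp only [if_neg h]
      simpa [List.append_assoc] using ih (rs ++ [(v, k)]) t 1

theorem bfold_accum (r : List Int) : ∀ (rs : List (Int × Int)) (v k : Int),
    bfold rs v k r = rs ++ bfold [] v k r := by
  induction r with
  | nil => intro rs v k; simp [bfold]
  | cons t r ih =>
    intro rs v k
    by_cases h : v = t
    · simp only [bfold, if_pos h]
      exact ih rs v (k + 1)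
    · simp only [bfold, if_neg h]
      rw [ih (rs ++ [(v, k)]) t 1, ih ([] ++ [(v, k)]) t 1]
      simp

theorem bfold_ne_nil (r : List Int) : ∀ (rs : List (Int × Int)) (v k : Int),
    bfold rs v k r ≠ [] := by
  induction r with
  | nil => intro rs v k; simp [bfold]
  | cons t r ih =>
    intro rs v k
    by_cases h : v = t
    · simp only [bfold, if_pos h]; exact ih rs v (k + 1)
    · simp only [bfold, if_neg h]; exact ih (rs ++ [(v, k)]) t 1

theorem main_lemma (c : Int) (r : List Int) : ∀ (v cs ns : Int),
    afold c ns cs v r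
      = ns + (((bfold [] v (cs + 1) r).dropLast.filter (fun p => p.2 > c)).length : Int) := by
  induction r with
  | nil => intro v cs ns; simp [afold, bfold]
  | cons t r ih =>
    intro v cs ns
    by_cases h : t = v
    · subst h
      simp only [afold, bfold]
      exact ih t (cs + 1) ns
    · have h' : ¬ v = t := fun e => h e.symm
      simp only [afold, if_neg h, bfold, if_neg h']
      rw [bfold_accum, ih t 0 (ns + if cs ≥ c then 1 else 0)]
      rw [List.dropLast_append_of_ne_nil (bfold_ne_nil r [] t 1)]
      rw [List.filter_append, List.length_append]
      have hcount : (List.filter (fun p => p.2 > c) [(v, cs + 1)]).length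
          = if cs ≥ c then 1 else 0 := by
        by_cases hc : cs ≥ c
        · have : cs + 1 > c := by omega
          simp [List.filter, hc, this]
        · have : ¬ (cs + 1 > c) := by omega
          simp [List.filter, hc, this]
      simp only [List.nil_append, zero_add] at *
      rw [hcount]
      push_cast
      ring

-- ===== VERDICT (by name: the statement is the Claim_ definition above) =====
theorem get_num_scrolls_spec : Claim_equal_get_num_scrolls := by
  intro move_times cutoff_size _
  unfold Spec_get_num_scrolls get_num_scrolls get_num_scrolls_alt
  cases move_times with
  | nil => simp
  | cons h r =>
    simp only [List.tail_cons]
    rw [afold_eq]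
    have hfold : (h :: r).foldl runsStep [] = bfold [] h 1 r := by
      have : (h :: r).foldl runsStep [] = r.foldl runsStep [(h, 1)] := by
        simp [List.foldl_cons, runsStep]
      rw [this]
      simpa using bfold_eq r [] h 1
    rw [hfold]
    have := main_lemma cutoff_size r h 0 0
    simpa using this
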